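-- pv_equiv track=rewrite | github.com/SungBalance/sdprofiler | tests/kernel_tests/flashinfer_kernel_tests/prefill_example_jiho.py | cal_kv_indtr
-- ===== SOURCE A (Python) =====
-- page_size = 16
--
-- def cal_kv_indtr(batch_token_distribution, max_num_pages):
--     current_kv_indptr = 0
--     kv_indptr = []
--     kv_last_page_len = []
--     for x in batch_token_distribution:
--         kv_indptr.append(current_kv_indptr)
--         if x % page_size == 0:
--             current_kv_indptr = current_kv_indptr + (x // page_size)
--             kv_last_page_len.append(page_size)
--         else:
--             current_kv_indptr = current_kv_indptr + (x // page_size) + 1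
--             kv_last_page_len.append(x % page_size)
--
--     #kv_indptr.append(max_num_pages)
--     kv_indptr.append(current_kv_indptr)
--     return kv_indptr, kv_last_page_len
-- ===== SOURCE B (Python) =====
-- page_size = 16
--
-- def cal_kv_indtr(batch_token_distribution, max_num_pages):
--     # Branch-free closed forms: pages(x) = ceil(x/16) = -(-x // 16),
--     # last page length = ((x - 1) % 16) + 1  (gives 16 when x is a multiple of 16).
--     total = sum(-(-x // page_size) for x in batch_token_distribution)
--     # Build kv_indptr back-to-front by subtracting page counts from the total.
--     kv_indptr = [total]
--     for x in reversed(batch_token_distribution):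
--         total -= -(-x // page_size)
--         kv_indptr.append(total)
--     kv_indptr.reverse()
--     kv_last_page_len = [((x - 1) % page_size) + 1 for x in batch_token_distribution]
--     return kv_indptr, kv_last_page_len
-- ===== Notes on version B (the rewrite author's own statement) =====
-- stated objective: alternative
-- what changed: Replaces A's branching forward running-sum loop with branch-free closed forms (pages = ceil division -(-x//16), last page length = ((x-1)%16)+1), computes the page total once, then builds kv_indptr back-to-front by subtracting page counts from the total and reversing.
import Mathlib
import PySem

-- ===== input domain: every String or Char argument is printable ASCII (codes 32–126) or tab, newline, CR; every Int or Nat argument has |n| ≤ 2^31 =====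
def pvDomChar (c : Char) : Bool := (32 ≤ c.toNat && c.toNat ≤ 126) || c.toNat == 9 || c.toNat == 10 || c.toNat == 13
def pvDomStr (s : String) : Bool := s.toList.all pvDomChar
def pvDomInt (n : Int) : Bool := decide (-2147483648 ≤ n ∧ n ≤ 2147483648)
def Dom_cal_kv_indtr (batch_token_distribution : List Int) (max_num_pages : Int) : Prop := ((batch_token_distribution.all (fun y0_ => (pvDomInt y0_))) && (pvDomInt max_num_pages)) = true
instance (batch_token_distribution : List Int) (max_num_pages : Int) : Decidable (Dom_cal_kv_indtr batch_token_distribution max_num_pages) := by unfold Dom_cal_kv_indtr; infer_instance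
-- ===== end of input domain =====

-- B replaces A's branching forward running-sum loop with branch-free closed forms and a
-- backward pass that subtracts page counts from the precomputed total (alternative decomposition).

-- ===== PORT A =====
def calKvGoA : List Int → Int → List Int → List Int → List Int × List Int
  | [], cur, kv_indptr, kv_last_page_len => (kv_indptr ++ [cur], kv_last_page_len)
  | x :: rest, cur, kv_indptr, kv_last_page_len =>
    if PySem.Int.mod x 16 = 0 then
      calKvGoA rest (cur + PySem.Int.floordiv x 16) (kv_indptr ++ [cur]) (kv_last_page_len ++ [16])
    else
      calKvGoA rest (cur + PySem.Int.floordiv x 16 + 1) (kv_indptr ++ [cur]) (kv_last_page_len ++ [PySem.Int.mod x 16])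

def cal_kv_indtr (batch_token_distribution : List Int) (max_num_pages : Int) : List Int × List Int :=
  calKvGoA batch_token_distribution 0 [] []

-- ===== PORT B =====
-- pvCeilPages x = -(-x // 16); pvLastLen x = ((x - 1) % 16) + 1 (B's inline closed forms)
def pvCeilPages (x : Int) : Int := -(PySem.Int.floordiv (-x) 16)

def pvLastLen (x : Int) : Int := PySem.Int.mod (x - 1) 16 + 1

-- the backward loop: for x in reversed(xs): total -= pages(x); kv_indptr.append(total)
def calKvGoB : List Int → Int → List Int → List Int
  | [], _, ind => ind
  | x :: rest, total, ind => calKvGoB rest (total - pvCeilPages x) (ind ++ [total - pvCeilPages x])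

def cal_kv_indtr_alt (batch_token_distribution : List Int) (max_num_pages : Int) : List Int × List Int :=
  let total := (batch_token_distribution.map pvCeilPages).sum
  ((calKvGoB batch_token_distribution.reverse total [total]).reverse,
   batch_token_distribution.map pvLastLen)

-- ===== PRECONDITION & SPEC =====
def Spec_cal_kv_indtr (batch_token_distribution : List Int) (max_num_pages : Int) (out : List Int × List Int) : Prop := out = cal_kv_indtr_alt batch_token_distribution max_num_pages
instance (batch_token_distribution : List Int) (max_num_pages : Int) (out : List Int × List Int) : Decidable (Spec_cal_kv_indtr batch_token_distribution max_num_pages out) := by unfold Spec_cal_kv_indtr; infer_instance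

-- ===== CLAIM (what is proved, stated in full; the proofs are below) =====
def Claim_equal_cal_kv_indtr : Prop := ∀ (batch_token_distribution : List Int) (max_num_pages : Int), Dom_cal_kv_indtr batch_token_distribution max_num_pages → Spec_cal_kv_indtr batch_token_distribution max_num_pages (cal_kv_indtr batch_token_distribution max_num_pages)

-- ===== LEMMAS AND PROOFS =====

-- per-element facts: A's branching page count / last-page length equal B's closed forms
theorem pages_pos (x : Int) (h : PySem.Int.mod x 16 = 0) :
    pvCeilPages x = PySem.Int.floordiv x 16 := by
  unfold pvCeilPages
  rw [PySem.Int.mod_eq_emod_of_pos (by norm_num : (0:Int) < 16)] at h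
  rw [PySem.Int.floordiv_eq_ediv_of_pos (by norm_num : (0:Int) < 16),
      PySem.Int.floordiv_eq_ediv_of_pos (by norm_num : (0:Int) < 16)]
  omega

theorem pages_neg (x : Int) (h : ¬ PySem.Int.mod x 16 = 0) :
    pvCeilPages x = PySem.Int.floordiv x 16 + 1 := by
  unfold pvCeilPages
  rw [PySem.Int.mod_eq_emod_of_pos (by norm_num : (0:Int) < 16)] at h
  rw [PySem.Int.floordiv_eq_ediv_of_pos (by norm_num : (0:Int) < 16),
      PySem.Int.floordiv_eq_ediv_of_pos (by norm_num : (0:Int) < 16)]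
  omega

theorem lastlen_pos (x : Int) (h : PySem.Int.mod x 16 = 0) :
    pvLastLen x = 16 := by
  unfold pvLastLen
  rw [PySem.Int.mod_eq_emod_of_pos (by norm_num : (0:Int) < 16)] at h
  rw [PySem.Int.mod_eq_emod_of_pos (by norm_num : (0:Int) < 16)]
  omega

theorem lastlen_neg (x : Int) (h : ¬ PySem.Int.mod x 16 = 0) :
    pvLastLen x = PySem.Int.mod x 16 := by
  unfold pvLastLen
  rw [PySem.Int.mod_eq_emod_of_pos (by norm_num : (0:Int) < 16)] at h
  rw [PySem.Int.mod_eq_emod_of_pos (by norm_num : (0:Int) < 16),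
      PySem.Int.mod_eq_emod_of_pos (by norm_num : (0:Int) < 16)]
  omega

-- A's loop equals accumulators ++ (prefix sums of pvCeilPages, map pvLastLen)
theorem calKvGoA_eq (bs : List Int) (cur : Int) (ip lp : List Int) :
    calKvGoA bs cur ip lp =
      (ip ++ List.scanl (· + ·) cur (bs.map pvCeilPages), lp ++ bs.map pvLastLen) := by
  induction bs generalizing cur ip lp with
  | nil => simp [calKvGoA]
  | cons x rest ih =>
    by_cases h : PySem.Int.mod x 16 = 0
    · rw [List.map_cons, List.map_cons, List.scanl_cons, pages_pos x h, lastlen_pos x h]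
      simp only [calKvGoA, if_pos h, ih]
      simp
    · rw [List.map_cons, List.map_cons, List.scanl_cons, pages_neg x h, lastlen_neg x h]
      simp only [calKvGoA, if_neg h, ih]
      simp [add_assoc]

-- the chain of values B's backward loop appends
def pvChain : List Int → Int → List Int
  | [], _ => []
  | x :: rest, t => (t - pvCeilPages x) :: pvChain rest (t - pvCeilPages x)

theorem calKvGoB_eq (l : List Int) (t : Int) (ind : List Int) :
    calKvGoB l t ind = ind ++ pvChain l t := by
  induction l generalizing t ind with
  | nil => simp [calKvGoB, pvChain]
  | cons x rest ih => simp [calKvGoB, pvChain, ih]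

theorem pvChain_append (l1 l2 : List Int) (t : Int) :
    pvChain (l1 ++ l2) t = pvChain l1 t ++ pvChain l2 (t - (l1.map pvCeilPages).sum) := by
  induction l1 generalizing t with
  | nil => simp [pvChain]
  | cons x rest ih => simp [pvChain, ih, sub_sub]

-- reversed descending suffix chain from t = forward prefix sums starting at t - total
theorem chain_rev (xs : List Int) (t : Int) :
    (t :: pvChain xs.reverse t).reverse
      = List.scanl (· + ·) (t - (xs.map pvCeilPages).sum) (xs.map pvCeilPages) := by
  induction xs generalizing t with
  | nil => simp [pvChain]
  | cons x rest ih =>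
    rw [show (x :: rest).reverse = rest.reverse ++ [x] from by simp, pvChain_append]
    simp only [pvChain, List.map_reverse, List.sum_reverse, List.map_cons, List.sum_cons,
      List.scanl_cons]
    rw [show t - (pvCeilPages x + (rest.map pvCeilPages).sum)
          = t - (rest.map pvCeilPages).sum - pvCeilPages x from by ring,
        show t - (rest.map pvCeilPages).sum - pvCeilPages x + pvCeilPages x
          = t - (rest.map pvCeilPages).sum from by ring]
    rw [← ih t]
    simp

-- ===== VERDICT (by name: the statement is the Claim_ definition above) =====
theorem cal_kv_indtr_spec : Claim_equal_cal_kv_indtr := by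
  intro bs m _
  unfold Spec_cal_kv_indtr cal_kv_indtr cal_kv_indtr_alt
  simp only [calKvGoA_eq, calKvGoB_eq, List.nil_append]
  have h := chain_rev bs ((bs.map pvCeilPages).sum)
  simp only [sub_self] at h
  rw [show ([(bs.map pvCeilPages).sum] ++ pvChain bs.reverse ((bs.map pvCeilPages).sum))
        = ((bs.map pvCeilPages).sum :: pvChain bs.reverse ((bs.map pvCeilPages).sum)) from rfl,
      h]
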